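-- pv_equiv track=rewrite | github.com/oyeprashar/Data-structures-and-algorithms | Arrays/segregateZeroes.py | segZeroes
-- ===== SOURCE A (Python) =====
-- def segZeroes(leftPtr,rightPtr,arr):
-- 	while leftPtr <= rightPtr:
--
-- 		if arr[leftPtr] == 0 and arr[rightPtr] == 0:
-- 			leftPtr += 1
--
-- 		elif arr[leftPtr] == 1 and arr[rightPtr] == 1:
-- 			rightPtr -= 1
--
-- 		elif arr[leftPtr] == 1 and arr[rightPtr] == 0:
-- 			# swap
-- 			arr[leftPtr] = 0
-- 			arr[rightPtr] = 1
--
-- 			leftPtr += 1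
-- 			rightPtr -= 1
--
-- 		elif arr[leftPtr] == 0 and arr[rightPtr] == 1:
-- 			leftPtr += 1
-- 			rightPtr -= 1
--
--
-- 	return arr
-- ===== SOURCE B (Python) =====
-- def segZeroes(leftPtr, rightPtr, arr):
-- 	# count zeros in the window, then overwrite it in place: zeros first, then ones
-- 	c = 0
-- 	for i in range(leftPtr, rightPtr + 1):
-- 		if arr[i] == 0:
-- 			c += 1
-- 	for i in range(leftPtr, rightPtr + 1):
-- 		arr[i] = 0 if i < leftPtr + c else 1
-- 	return arr
-- ===== Notes on version B (the rewrite author's own statement) =====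
-- stated objective: simpler
-- what changed: Replaces A's four-way two-pointer swapping loop by counting the zeros in the window once and then overwriting the window in place (zeros first, then ones).
-- outside the precondition, e.g. on segZeroes(-2, 1, [0, 1]): A returns [1, 0], B returns [1, 1]
import Mathlib
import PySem

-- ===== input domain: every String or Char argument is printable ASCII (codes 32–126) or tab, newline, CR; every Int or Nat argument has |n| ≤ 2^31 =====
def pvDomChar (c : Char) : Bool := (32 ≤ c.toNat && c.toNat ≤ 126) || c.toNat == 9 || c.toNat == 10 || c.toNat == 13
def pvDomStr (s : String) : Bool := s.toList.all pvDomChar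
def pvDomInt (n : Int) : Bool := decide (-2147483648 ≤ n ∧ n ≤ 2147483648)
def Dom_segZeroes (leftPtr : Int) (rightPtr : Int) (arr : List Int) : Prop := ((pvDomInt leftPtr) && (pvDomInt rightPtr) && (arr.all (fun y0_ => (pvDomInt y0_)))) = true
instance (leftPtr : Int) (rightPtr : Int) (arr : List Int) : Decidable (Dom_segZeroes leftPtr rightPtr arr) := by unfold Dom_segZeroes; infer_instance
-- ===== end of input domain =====

-- B replaces A's two-pointer swapping loop by count-zeros-then-overwrite-the-window (simpler single idea, same in-place mutation of arr).


-- ===== PORT A =====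
-- A's `while` loop as fuel recursion.  Under Pre_ every iteration moves leftPtr up or
-- rightPtr down, so (rightPtr+1-leftPtr) iterations always suffice; the fuel-exhausted
-- fallthrough and the two `arr`-returning fallbacks below (IndexError / no branch fires,
-- where Python raises resp. loops forever) are reachable only outside Pre_segZeroes.
def segALoop : Nat → Int → Int → List Int → List Int
  | 0, _, _, arr => arr
  | (fuel+1), l, r, arr =>
    if l ≤ r then
      if PySem.List.pyGet? arr l = some 0 ∧ PySem.List.pyGet? arr r = some 0 then
        segALoop fuel (l+1) r arr
      else if PySem.List.pyGet? arr l = some 1 ∧ PySem.List.pyGet? arr r = some 1 then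
        segALoop fuel l (r-1) arr
      else if PySem.List.pyGet? arr l = some 1 ∧ PySem.List.pyGet? arr r = some 0 then
        segALoop fuel (l+1) (r-1) (PySem.List.pySetD (PySem.List.pySetD arr l 0) r 1)
      else if PySem.List.pyGet? arr l = some 0 ∧ PySem.List.pyGet? arr r = some 1 then
        segALoop fuel (l+1) (r-1) arr
      else arr
    else arr

def segZeroes (leftPtr : Int) (rightPtr : Int) (arr : List Int) : List Int :=
  segALoop (rightPtr + 1 - leftPtr).toNat leftPtr rightPtr arr

-- ===== PORT B =====
-- Source B: first loop counts zeros in the window, second loop overwrites the window.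
def segZeroes_alt (leftPtr : Int) (rightPtr : Int) (arr : List Int) : List Int :=
  let c : Int := (PySem.List.pyRange leftPtr (rightPtr + 1) 1).foldl
    (fun acc i => if PySem.List.pyGet? arr i = some 0 then acc + 1 else acc) 0
  (PySem.List.pyRange leftPtr (rightPtr + 1) 1).foldl
    (fun a i => PySem.List.pySetD a i (if i < leftPtr + c then 0 else 1)) arr

-- ===== PRECONDITION & SPEC =====
-- Pre_ excludes exactly the inputs outside A's contract: when the loop runs (leftPtr ≤ rightPtr)
-- the pointers must be in-range non-negative indices and the window must be binary — otherwise A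
-- raises IndexError, loops forever on a non-binary value, or (negative pointers) returns a value
-- driven by Python's negative-index wraparound, an accidental corner no caller would specify.
def Pre_segZeroes (leftPtr : Int) (rightPtr : Int) (arr : List Int) : Prop :=
  leftPtr ≤ rightPtr →
    (0 ≤ leftPtr ∧ rightPtr < (arr.length : Int) ∧
      ∀ i ∈ PySem.List.pyRange leftPtr (rightPtr + 1) 1,
        PySem.List.pyGet? arr i = some 0 ∨ PySem.List.pyGet? arr i = some 1)
instance (leftPtr : Int) (rightPtr : Int) (arr : List Int) : Decidable (Pre_segZeroes leftPtr rightPtr arr) := by unfold Pre_segZeroes; infer_instance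
def pvWitness_segZeroes : Int × Int × List Int := (0, 3, [1, 0, 1, 0])

def Spec_segZeroes (leftPtr : Int) (rightPtr : Int) (arr : List Int) (out : List Int) : Prop := out = segZeroes_alt leftPtr rightPtr arr
instance (leftPtr : Int) (rightPtr : Int) (arr : List Int) (out : List Int) : Decidable (Spec_segZeroes leftPtr rightPtr arr out) := by unfold Spec_segZeroes; infer_instance

-- ===== CLAIM (what is proved, stated in full; the proofs are below) =====
def Claim_equal_segZeroes : Prop := ∀ (leftPtr : Int) (rightPtr : Int) (arr : List Int), Dom_segZeroes leftPtr rightPtr arr → Pre_segZeroes leftPtr rightPtr arr → Spec_segZeroes leftPtr rightPtr arr (segZeroes leftPtr rightPtr arr)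

-- ===== LEMMAS AND PROOFS =====

-- number of zeros B counts in the window [l, r]
def zcW (l r : Int) (arr : List Int) : Int :=
  ((PySem.List.pyRange l (r + 1) 1).countP
    (fun i => decide (PySem.List.pyGet? arr i = some 0)) : Int)

lemma alt_eq (l r : Int) (arr : List Int) :
    segZeroes_alt l r arr = (PySem.List.pyRange l (r + 1) 1).foldl
      (fun a i => PySem.List.pySetD a i (if i < l + zcW l r arr then 0 else 1)) arr := by
  unfold segZeroes_alt zcW
  rw [PySem.List.foldl_ite_add_one, zero_add]

lemma zc_cons (l r : Int) (arr : List Int) (h : l ≤ r) :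
    zcW l r arr =
      (if PySem.List.pyGet? arr l = some 0 then 1 else 0) + zcW (l+1) r arr := by
  unfold zcW
  rw [PySem.List.pyRange_one_cons (by omega), List.countP_cons]
  by_cases h1 : PySem.List.pyGet? arr l = some 0
  · simp [h1]; omega
  · simp [h1]

lemma zc_last (l r : Int) (arr : List Int) (h : l ≤ r) :
    zcW l r arr =
      zcW l (r-1) arr + (if PySem.List.pyGet? arr r = some 0 then 1 else 0) := by
  unfold zcW
  rw [show r + 1 = r - 1 + 1 + 1 by ring]
  rw [show PySem.List.pyRange l (r - 1 + 1 + 1) 1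
        = PySem.List.pyRange l (r - 1 + 1) 1 ++ [r - 1 + 1]
      from PySem.List.pyRange_one_succ_right (by omega)]
  rw [List.countP_append]
  simp only [List.countP_singleton, show r - 1 + 1 = r by ring]
  by_cases h1 : PySem.List.pyGet? arr r = some 0
  · simp [h1]
  · simp [h1]

lemma zc_nonneg (l r : Int) (arr : List Int) : 0 ≤ zcW l r arr := by
  unfold zcW; positivity

lemma zc_nil (l r : Int) (arr : List Int) (h : r < l) : zcW l r arr = 0 := by
  unfold zcW
  rw [PySem.List.pyRange_one_eq_nil (by omega)]
  simp

lemma zc_le (l r : Int) (arr : List Int) : zcW l r arr ≤ r + 1 - l ∨ r + 1 ≤ l := by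
  by_cases h : r + 1 ≤ l
  · right; exact h
  · left
    unfold zcW
    have h1 := List.countP_le_length (l := PySem.List.pyRange l (r + 1) 1)
      (p := fun i => decide (PySem.List.pyGet? arr i = some 0))
    rw [PySem.List.length_pyRange_one] at h1
    omega

lemma zc_congr (l r : Int) (arr arr' : List Int)
    (h : ∀ i, l ≤ i → i ≤ r → PySem.List.pyGet? arr i = PySem.List.pyGet? arr' i) :
    zcW l r arr = zcW l r arr' := by
  unfold zcW
  congr 1
  refine List.countP_congr (fun i hi => ?_)
  rw [PySem.List.mem_pyRange_one] at hi
  rw [h i hi.1 (by omega)]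

-- pointwise description of B's write loop
lemma wget (f : Int → Int) (r : Int) :
    ∀ (n : Nat) (l : Int) (arr : List Int), (r + 1 - l).toNat ≤ n → 0 ≤ l →
      r < (arr.length : Int) → ∀ j : Nat,
      ((PySem.List.pyRange l (r + 1) 1).foldl
        (fun a i => PySem.List.pySetD a i (f i)) arr)[j]? =
      if l ≤ (j : Int) ∧ (j : Int) ≤ r then some (f (j : Int)) else arr[j]? := by
  intro n
  induction n with
  | zero =>
    intro l arr hn hl hr j
    rw [PySem.List.pyRange_one_eq_nil (by omega)]
    simp only [List.foldl_nil]
    rw [if_neg (by omega)]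
  | succ n ih =>
    intro l arr hn hl hr j
    by_cases hlr : l ≤ r
    · rw [PySem.List.pyRange_one_cons (by omega), List.foldl_cons,
        PySem.List.pySetD_of_nonneg arr _ hl]
      have hlen : l.toNat < arr.length := by omega
      have hlen' : ((arr.set l.toNat (f l)).length : Int) = (arr.length : Int) := by
        rw [List.length_set]
      rw [ih (l+1) (arr.set l.toNat (f l)) (by omega) (by omega) (by rw [hlen'] ; exact hr) j]
      by_cases hj1 : l + 1 ≤ (j : Int) ∧ (j : Int) ≤ r
      · rw [if_pos hj1, if_pos (by omega)]
      · rw [if_neg hj1]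
        by_cases hj2 : (j : Int) = l
        · have hjl : j = l.toNat := by omega
          subst hjl
          rw [List.getElem?_set_self hlen, if_pos (by omega), hj2]
        · rw [List.getElem?_set_ne (by omega), if_neg (by omega)]
    · rw [PySem.List.pyRange_one_eq_nil (by omega)]
      simp only [List.foldl_nil]
      rw [if_neg (by omega)]

lemma alt_nil (l r : Int) (arr : List Int) (h : r < l) : segZeroes_alt l r arr = arr := by
  rw [alt_eq, PySem.List.pyRange_one_eq_nil (by omega), List.foldl_nil]

-- get-form of B on a valid window
lemma alt_get (l r : Int) (arr : List Int) (hl : 0 ≤ l) (hr : r < (arr.length : Int)) (j : Nat) :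
    (segZeroes_alt l r arr)[j]? =
      if l ≤ (j : Int) ∧ (j : Int) ≤ r
        then some (if (j : Int) < l + zcW l r arr then 0 else 1)
        else arr[j]? := by
  rw [alt_eq]
  exact wget _ r (r + 1 - l).toNat l arr le_rfl hl hr j

lemma pyGet_eq_getElem (arr : List Int) (i : Int) (h : 0 ≤ i) :
    PySem.List.pyGet? arr i = arr[i.toNat]? := PySem.List.pyGet?_of_nonneg arr h

lemma main_loop :
    ∀ (fuel : Nat) (l r : Int) (arr : List Int), (r + 1 - l).toNat ≤ fuel →
      (l ≤ r → 0 ≤ l ∧ r < (arr.length : Int) ∧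
        ∀ i, l ≤ i → i ≤ r →
          PySem.List.pyGet? arr i = some 0 ∨ PySem.List.pyGet? arr i = some 1) →
      segALoop fuel l r arr = segZeroes_alt l r arr := by
  intro fuel
  induction fuel with
  | zero =>
    intro l r arr hn _
    rw [segALoop, alt_nil l r arr (by omega)]
  | succ n ih =>
    intro l r arr hn hpre
    by_cases hlr : l ≤ r
    · obtain ⟨hl, hr, hbin⟩ := hpre hlr
      have hb_l := hbin l (le_refl l) hlr
      have hb_r := hbin r hlr (le_refl r)
      have hgl : PySem.List.pyGet? arr l = arr[l.toNat]? := pyGet_eq_getElem arr l hl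
      have hgr : PySem.List.pyGet? arr r = arr[r.toNat]? := pyGet_eq_getElem arr r (by omega)
      rw [segALoop, if_pos hlr]
      rcases hb_l with h0l | h1l
      · rcases hb_r with h0r | h1r
        · -- case arr[l] = 0, arr[r] = 0 : leftPtr += 1
          rw [if_pos ⟨h0l, h0r⟩]
          rw [ih (l+1) r arr (by omega)
            (fun h' => ⟨by omega, hr, fun i hi1 hi2 => hbin i (by omega) hi2⟩)]
          have hc := zc_cons l r arr hlr
          rw [if_pos h0l] at hc
          refine (List.ext_getElem?_iff.mpr (fun j => ?_)).symm
          rw [alt_get l r arr hl hr j, alt_get (l+1) r arr (by omega) hr j]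
          by_cases hj1 : l + 1 ≤ (j : Int) ∧ (j : Int) ≤ r
          · rw [if_pos (by omega), if_pos hj1]
            congr 1
            have : l + zcW l r arr = l + 1 + zcW (l+1) r arr := by omega
            rw [this]
          · rw [if_neg hj1]
            by_cases hj2 : (j : Int) = l
            · have hc1 : 1 ≤ zcW l r arr := by
                have := zc_nonneg (l+1) r arr; omega
              rw [if_pos (by omega), if_pos (by omega)]
              rw [← hj2] at h0l
              rw [pyGet_eq_getElem arr _ (by omega)] at h0l
              simp only [Int.toNat_natCast] at h0l
              exact h0l.symm
            · rw [if_neg (by omega)]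
        · -- case arr[l] = 0, arr[r] = 1 : both pointers move
          rw [if_neg (by simp [h1r]), if_neg (by simp [h0l]), if_neg (by simp [h0l]),
            if_pos ⟨h0l, h1r⟩]
          have hlr' : l < r := by
            rcases eq_or_lt_of_le hlr with h | h
            · subst h; rw [h0l] at h1r; simp at h1r
            · exact h
          rw [ih (l+1) (r-1) arr (by omega)
            (fun h' => ⟨by omega, by omega, fun i hi1 hi2 => hbin i (by omega) (by omega)⟩)]
          have hc := zc_cons l r arr hlr
          rw [if_pos h0l] at hc
          have hc2 := zc_last (l+1) r arr (by omega)
          rw [if_neg (by simp [h1r])] at hc2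
          have hcle2 : zcW (l+1) (r-1) arr ≤ r - l - 1 := by
            rcases zc_le (l+1) (r-1) arr with h | h
            · omega
            · have := zc_nil (l+1) (r-1) arr (by omega); omega
          have hcnn := zc_nonneg (l+1) (r-1) arr
          refine (List.ext_getElem?_iff.mpr (fun j => ?_)).symm
          rw [alt_get l r arr hl hr j, alt_get (l+1) (r-1) arr (by omega) (by omega) j]
          by_cases hj1 : l + 1 ≤ (j : Int) ∧ (j : Int) ≤ r - 1
          · rw [if_pos (by omega), if_pos hj1]
            congr 1
            have : l + zcW l r arr = l + 1 + zcW (l+1) (r-1) arr := by omega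
            rw [this]
          · rw [if_neg hj1]
            by_cases hj2 : (j : Int) = l
            · rw [if_pos (by omega), if_pos (by omega)]
              rw [← hj2] at h0l
              rw [pyGet_eq_getElem arr _ (by omega)] at h0l
              simp only [Int.toNat_natCast] at h0l
              exact h0l.symm
            · by_cases hj3 : (j : Int) = r
              · rw [if_pos (by omega), if_neg (by omega)]
                rw [← hj3] at h1r
                rw [pyGet_eq_getElem arr _ (by omega)] at h1r
                simp only [Int.toNat_natCast] at h1r
                exact h1r.symm
              · rw [if_neg (by omega)]
      · rcases hb_r with h0r | h1r
        · -- case arr[l] = 1, arr[r] = 0 : swap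
          rw [if_neg (by simp [h1l]), if_neg (by simp [h0r]), if_pos ⟨h1l, h0r⟩]
          have hlr' : l < r := by
            rcases eq_or_lt_of_le hlr with h | h
            · subst h; rw [h1l] at h0r; simp at h0r
            · exact h
          set arr' := PySem.List.pySetD (PySem.List.pySetD arr l 0) r 1 with harr'
          have harr'2 : arr' = (arr.set l.toNat 0).set r.toNat 1 := by
            rw [harr', PySem.List.pySetD_of_nonneg arr _ hl,
              PySem.List.pySetD_of_nonneg (arr.set l.toNat 0) _ (by omega)]
          have hlen' : arr'.length = arr.length := by
            rw [harr'2, List.length_set, List.length_set]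
          have hmid : ∀ i, l + 1 ≤ i → i ≤ r - 1 →
              PySem.List.pyGet? arr' i = PySem.List.pyGet? arr i := by
            intro i hi1 hi2
            rw [harr'2, pyGet_eq_getElem _ i (by omega), pyGet_eq_getElem arr i (by omega),
              List.getElem?_set_ne (by omega), List.getElem?_set_ne (by omega)]
          rw [ih (l+1) (r-1) arr' (by omega)
            (fun h' => ⟨by omega, by rw [hlen']; omega, fun i hi1 hi2 => by
              rw [hmid i hi1 hi2]; exact hbin i (by omega) (by omega)⟩)]
          have hc := zc_cons l r arr hlr
          rw [if_neg (by simp [h1l])] at hc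
          have hc2 := zc_last (l+1) r arr (by omega)
          rw [if_pos h0r] at hc2
          have hcmid : zcW (l+1) (r-1) arr' = zcW (l+1) (r-1) arr :=
            zc_congr _ _ _ _ (fun i hi1 hi2 => hmid i hi1 hi2)
          have hcle : zcW (l+1) r arr ≤ r - l := by
            rcases zc_le (l+1) r arr with h | h <;> omega
          have hcnn := zc_nonneg (l+1) (r-1) arr
          refine (List.ext_getElem?_iff.mpr (fun j => ?_)).symm
          rw [alt_get l r arr hl hr j,
            alt_get (l+1) (r-1) arr' (by omega) (by rw [hlen']; omega) j]
          by_cases hj1 : l + 1 ≤ (j : Int) ∧ (j : Int) ≤ r - 1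
          · rw [if_pos (by omega), if_pos hj1, hcmid]
            congr 1
            have : l + zcW l r arr = l + 1 + zcW (l+1) (r-1) arr := by omega
            rw [this]
          · rw [if_neg hj1]
            by_cases hj2 : (j : Int) = l
            · have hjl : j = l.toNat := by omega
              rw [if_pos (by omega), if_pos (by omega), harr'2, hjl,
                List.getElem?_set_ne (by omega), List.getElem?_set_self (by omega)]
            · by_cases hj3 : (j : Int) = r
              · have hjr : j = r.toNat := by omega
                rw [if_pos (by omega), if_neg (by omega), harr'2, hjr,
                  List.getElem?_set_self (by rw [List.length_set]; omega)]
              · rw [if_neg (by omega), harr'2,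
                  List.getElem?_set_ne (by omega), List.getElem?_set_ne (by omega)]
        · -- case arr[l] = 1, arr[r] = 1 : rightPtr -= 1
          rw [if_neg (by simp [h1l]), if_pos ⟨h1l, h1r⟩]
          rw [ih l (r-1) arr (by omega)
            (fun h' => ⟨hl, by omega, fun i hi1 hi2 => hbin i hi1 (by omega)⟩)]
          have hc := zc_last l r arr hlr
          rw [if_neg (by simp [h1r])] at hc
          have hcle : zcW l (r-1) arr ≤ r - l := by
            rcases zc_le l (r-1) arr with h | h
            · omega
            · have := zc_nil l (r-1) arr (by omega); omega
          have hcnn := zc_nonneg l (r-1) arr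
          refine (List.ext_getElem?_iff.mpr (fun j => ?_)).symm
          rw [alt_get l r arr hl hr j, alt_get l (r-1) arr hl (by omega) j]
          by_cases hj1 : l ≤ (j : Int) ∧ (j : Int) ≤ r - 1
          · rw [if_pos (by omega), if_pos hj1]
            congr 1
            rw [show zcW l r arr = zcW l (r-1) arr by omega]
          · rw [if_neg hj1]
            by_cases hj2 : (j : Int) = r
            · rw [if_pos (by omega), if_neg (by omega)]
              rw [← hj2] at h1r
              rw [pyGet_eq_getElem arr _ (by omega)] at h1r
              simp only [Int.toNat_natCast] at h1r
              exact h1r.symm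
            · rw [if_neg (by omega)]
    · rw [segALoop, if_neg hlr, alt_nil l r arr (by omega)]

-- ===== VERDICT (by name: the statement is the Claim_ definition above) =====
theorem segZeroes_spec : Claim_equal_segZeroes := by
  intro l r arr _ hpre
  unfold Spec_segZeroes segZeroes
  apply main_loop _ l r arr le_rfl
  intro hlr
  obtain ⟨h1, h2, h3⟩ := hpre hlr
  exact ⟨h1, h2, fun i hi1 hi2 => h3 i (by rw [PySem.List.mem_pyRange_one]; omega)⟩
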